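-- pv_equiv track=rewrite | github.com/RKG765/resume_job_matcher | backend/src/clustering/job_clusterer.py | _infer_domain_label
-- ===== SOURCE A (Python) =====
-- from typing import List, Dict, Tuple, Optional
--
-- def _infer_domain_label(top_terms: List[str]) -> str:
--     """Infer a domain label from top cluster terms."""
--     terms_lower = set(t.lower() for t in top_terms)
--
--     # Heuristic matching to common domains
--     if terms_lower & {'python', 'machine', 'learning', 'data', 'model', 'ml'}:
--         return "Data Science & ML"
--     elif terms_lower & {'react', 'frontend', 'css', 'javascript', 'ui', 'ux'}:
--         return "Frontend Development"
--     elif terms_lower & {'backend', 'api', 'server', 'database', 'sql'}: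
--         return "Backend Development"
--     elif terms_lower & {'devops', 'docker', 'kubernetes', 'aws', 'cloud', 'infrastructure'}:
--         return "DevOps & Cloud"
--     elif terms_lower & {'java', 'spring', 'enterprise', 'microservices'}:
--         return "Enterprise Software"
--     elif terms_lower & {'ios', 'android', 'mobile', 'flutter', 'swift'}:
--         return "Mobile Development"
--     elif terms_lower & {'security', 'penetration', 'vulnerability', 'cyber'}:
--         return "Cybersecurity"
--     elif terms_lower & {'product', 'manager', 'agile', 'stakeholder'}:
--         return "Product Management"
--     elif terms_lower & {'test', 'qa', 'quality', 'automation'}: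
--         return "Quality Assurance"
--     else:
--         # Use top terms as label
--         return " / ".join(top_terms[:3]).title()
-- ===== SOURCE B (Python) =====
-- from typing import List
--
-- _DOMAINS = [
--     (('python', 'machine', 'learning', 'data', 'model', 'ml'), "Data Science & ML"),
--     (('react', 'frontend', 'css', 'javascript', 'ui', 'ux'), "Frontend Development"),
--     (('backend', 'api', 'server', 'database', 'sql'), "Backend Development"),
--     (('devops', 'docker', 'kubernetes', 'aws', 'cloud', 'infrastructure'), "DevOps & Cloud"),
--     (('java', 'spring', 'enterprise', 'microservices'), "Enterprise Software"),
--     (('ios', 'android', 'mobile', 'flutter', 'swift'), "Mobile Development"),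
--     (('security', 'penetration', 'vulnerability', 'cyber'), "Cybersecurity"),
--     (('product', 'manager', 'agile', 'stakeholder'), "Product Management"),
--     (('test', 'qa', 'quality', 'automation'), "Quality Assurance"),
-- ]
--
-- # term -> (priority_index, label); lower index wins on any (hypothetical) overlap
-- _TERM_INDEX = {}
-- for _i, (_kws, _label) in enumerate(_DOMAINS):
--     for _kw in _kws:
--         _TERM_INDEX.setdefault(_kw, (_i, _label))
--
--
-- def _infer_domain_label(top_terms: List[str]) -> str:
--     """Infer a domain label from top cluster terms."""
--     best = None
--     for t in top_terms:
--         hit = _TERM_INDEX.get(t.lower())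
--         if hit is not None and (best is None or hit[0] < best[0]):
--             best = hit
--     if best is not None:
--         return best[1]
--     return " / ".join(top_terms[:3]).title()
-- ===== Notes on version B (the rewrite author's own statement) =====
-- stated objective: idiomatic
-- what changed: Replaces the nine sequential set-intersection tests over category keyword sets with a single prebuilt term->(priority,label) index and one pass over the input terms tracking the minimum-priority hit.
import Mathlib
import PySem

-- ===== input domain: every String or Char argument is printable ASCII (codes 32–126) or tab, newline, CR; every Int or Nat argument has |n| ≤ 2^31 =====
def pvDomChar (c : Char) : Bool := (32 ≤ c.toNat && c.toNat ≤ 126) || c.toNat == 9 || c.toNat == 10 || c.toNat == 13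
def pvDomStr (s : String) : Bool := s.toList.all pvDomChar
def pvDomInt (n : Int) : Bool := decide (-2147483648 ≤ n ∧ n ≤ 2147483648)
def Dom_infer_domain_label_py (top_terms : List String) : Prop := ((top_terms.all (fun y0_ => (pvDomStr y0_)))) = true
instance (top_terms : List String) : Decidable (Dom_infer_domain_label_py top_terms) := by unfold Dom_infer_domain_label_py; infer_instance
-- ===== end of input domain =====

-- B replaces A's nine sequential set-intersection tests with a prebuilt term->(priority,label)
-- index and a single pass over the input terms tracking the minimum-priority hit (idiomatic).

-- hand port of str.title(): exact on ASCII (cased character = ASCII letter there);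
-- uppercase a letter whose predecessor is not a letter, lowercase the other letters
def pyTitleChars : List Char → Bool → List Char
  | [], _ => []
  | c :: cs, prevCased =>
    (if PySem.Chars.isalpha c then
      (if prevCased then PySem.Chars.lowerChar c else PySem.Chars.upperChar c)
     else c) :: pyTitleChars cs (PySem.Chars.isalpha c)

def pyTitle (s : String) : String := String.ofList (pyTitleChars s.toList false)

-- ===== PORT A =====
def infer_domain_label_py (top_terms : List String) : String :=
  let terms_lower : PySem.Set String := PySem.Set.ofList (top_terms.map PySem.Str.lower)
  if PySem.Set.inter terms_lower (PySem.Set.ofList ["python", "machine", "learning", "data", "model", "ml"]) ≠ [] then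
    "Data Science & ML"
  else if PySem.Set.inter terms_lower (PySem.Set.ofList ["react", "frontend", "css", "javascript", "ui", "ux"]) ≠ [] then
    "Frontend Development"
  else if PySem.Set.inter terms_lower (PySem.Set.ofList ["backend", "api", "server", "database", "sql"]) ≠ [] then
    "Backend Development"
  else if PySem.Set.inter terms_lower (PySem.Set.ofList ["devops", "docker", "kubernetes", "aws", "cloud", "infrastructure"]) ≠ [] then
    "DevOps & Cloud"
  else if PySem.Set.inter terms_lower (PySem.Set.ofList ["java", "spring", "enterprise", "microservices"]) ≠ [] then
    "Enterprise Software"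
  else if PySem.Set.inter terms_lower (PySem.Set.ofList ["ios", "android", "mobile", "flutter", "swift"]) ≠ [] then
    "Mobile Development"
  else if PySem.Set.inter terms_lower (PySem.Set.ofList ["security", "penetration", "vulnerability", "cyber"]) ≠ [] then
    "Cybersecurity"
  else if PySem.Set.inter terms_lower (PySem.Set.ofList ["product", "manager", "agile", "stakeholder"]) ≠ [] then
    "Product Management"
  else if PySem.Set.inter terms_lower (PySem.Set.ofList ["test", "qa", "quality", "automation"]) ≠ [] then
    "Quality Assurance"
  else
    pyTitle (PySem.Str.join " / " (PySem.List.slice top_terms none (some 3)))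

-- ===== PORT B =====
def bDomains : List (List String × String) :=
  [ (["python", "machine", "learning", "data", "model", "ml"], "Data Science & ML"),
    (["react", "frontend", "css", "javascript", "ui", "ux"], "Frontend Development"),
    (["backend", "api", "server", "database", "sql"], "Backend Development"),
    (["devops", "docker", "kubernetes", "aws", "cloud", "infrastructure"], "DevOps & Cloud"),
    (["java", "spring", "enterprise", "microservices"], "Enterprise Software"),
    (["ios", "android", "mobile", "flutter", "swift"], "Mobile Development"),
    (["security", "penetration", "vulnerability", "cyber"], "Cybersecurity"),
    (["product", "manager", "agile", "stakeholder"], "Product Management"),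
    (["test", "qa", "quality", "automation"], "Quality Assurance") ]

-- _TERM_INDEX: built once, setdefault so a lower priority index wins
def bIndex : PySem.Dict String (Nat × String) :=
  (PySem.List.enumerate bDomains).foldl
    (fun d p =>
      p.2.1.foldl
        (fun d kw => if d.contains kw then d else d.insert kw (p.1.toNat, p.2.2)) d)
    PySem.Dict.empty

def bStep (best : Option (Nat × String)) (t : String) : Option (Nat × String) :=
  match PySem.Dict.get? bIndex (PySem.Str.lower t) with
  | none => best
  | some hit =>
    match best with
    | none => some hit
    | some b => if hit.1 < b.1 then some hit else best

def infer_domain_label_py_alt (top_terms : List String) : String :=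
  match top_terms.foldl bStep none with
  | some b => b.2
  | none => pyTitle (PySem.Str.join " / " (PySem.List.slice top_terms none (some 3)))

-- ===== PRECONDITION & SPEC =====
def Spec_infer_domain_label_py (top_terms : List String) (out : String) : Prop := out = infer_domain_label_py_alt top_terms
instance (top_terms : List String) (out : String) : Decidable (Spec_infer_domain_label_py top_terms out) := by unfold Spec_infer_domain_label_py; infer_instance

-- ===== CLAIM (what is proved, stated in full; the proofs are below) =====
def Claim_equal_infer_domain_label_py : Prop := ∀ (top_terms : List String), Dom_infer_domain_label_py top_terms → Spec_infer_domain_label_py top_terms (infer_domain_label_py top_terms)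

-- ===== LEMMAS AND PROOFS =====

-- keyword list and label of category i
def Kf (i : Nat) : List String := ((bDomains[i]?).map Prod.fst).getD []
def Lf (i : Nat) : String := ((bDomains[i]?).map Prod.snd).getD ""

-- specification of the dict lookup: first category (in priority order) containing s
def catIdx (s : String) : Option (Nat × String) :=
  if s ∈ Kf 0 then some (0, Lf 0)
  else if s ∈ Kf 1 then some (1, Lf 1)
  else if s ∈ Kf 2 then some (2, Lf 2)
  else if s ∈ Kf 3 then some (3, Lf 3)
  else if s ∈ Kf 4 then some (4, Lf 4)
  else if s ∈ Kf 5 then some (5, Lf 5)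
  else if s ∈ Kf 6 then some (6, Lf 6)
  else if s ∈ Kf 7 then some (7, Lf 7)
  else if s ∈ Kf 8 then some (8, Lf 8)
  else none

lemma find_group (K : List String) (v : Nat × String) (s : String) :
    Option.map (fun _ => v) (List.find? (fun kw => kw == s) K) = if s ∈ K then some v else none := by
  induction K with
  | nil => simp
  | cons k K ih =>
    by_cases h : k = s
    · simp [h]
    · have hb : (k == s) = false := by simp [h]
      simp only [List.find?_cons, hb, List.mem_cons]
      simpa [Ne.symm h] using ih

def grp (i : Nat) : List (String × (Nat × String)) := (Kf i).map (fun kw => (kw, (i, Lf i)))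

set_option maxRecDepth 100000 in
lemma items_eq : bIndex.items = grp 0 ++ grp 1 ++ grp 2 ++ grp 3 ++ grp 4 ++ grp 5 ++ grp 6 ++ grp 7 ++ grp 8 := by decide

lemma lookup_eq (s : String) : PySem.Dict.get? bIndex s = catIdx s := by
  rw [PySem.Dict.get?, items_eq]
  simp only [List.find?_append, Option.map_or, grp, List.find?_map, Option.map_map, Function.comp_def, find_group]
  unfold catIdx
  split_ifs <;> simp_all

-- category i matched by some term of ts
def cMatch (i : Nat) (ts : List String) : Prop := ∃ t ∈ ts, PySem.Str.lower t ∈ Kf i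

def mcomb (a b : Option (Nat × String)) : Option (Nat × String) :=
  match b with
  | none => a
  | some h =>
    match a with
    | none => some h
    | some x => if h.1 < x.1 then some h else a

lemma bStep_eq (a : Option (Nat × String)) (t : String) :
    bStep a t = mcomb a (catIdx (PySem.Str.lower t)) := by
  unfold bStep
  rw [lookup_eq]
  unfold mcomb
  cases catIdx (PySem.Str.lower t) <;> cases a <;> rfl

lemma mcomb_none (c : Option (Nat × String)) : mcomb none c = c := by
  cases c <;> rfl

lemma mcomb_assoc (a b c : Option (Nat × String)) :
    mcomb (mcomb a b) c = mcomb a (mcomb b c) := by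
  rcases b with _ | b
  · rw [show mcomb a none = a from rfl, mcomb_none]
  rcases a with _ | a
  · rw [mcomb_none, mcomb_none]
  rcases c with _ | c
  · rfl
  show mcomb (if b.1 < a.1 then some b else some a) (some c)
      = mcomb (some a) (if c.1 < b.1 then some c else some b)
  by_cases h1 : b.1 < a.1 <;> by_cases h2 : c.1 < b.1 <;>
    simp only [h1, h2, if_pos, ite_false, mcomb] <;>
    split_ifs <;> first | rfl | omega | simp_all

lemma fold_mcomb (ts : List String) (a : Option (Nat × String)) :
    ts.foldl bStep a = mcomb a (ts.foldl bStep none) := by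
  induction ts generalizing a with
  | nil => cases a <;> rfl
  | cons t ts ih =>
    simp only [List.foldl_cons]
    rw [ih (bStep a t), ih (bStep none t), bStep_eq, bStep_eq none t, mcomb_none, mcomb_assoc]

lemma catIdx_none (s : String) (h : catIdx s = none) : ∀ i < 9, s ∉ Kf i := by
  intro i hi
  unfold catIdx at h
  split_ifs at h <;> first
    | exact Option.noConfusion h
    | (interval_cases i <;> assumption)

lemma catIdx_some (s : String) (p : Nat × String) (h : catIdx s = some p) :
    p.1 < 9 ∧ p.2 = Lf p.1 ∧ s ∈ Kf p.1 ∧ ∀ j < p.1, s ∉ Kf j := by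
  unfold catIdx at h
  split_ifs at h <;> first
    | exact Option.noConfusion h
    | (injection h with h
       subst h
       refine ⟨by omega, rfl, by assumption, ?_⟩
       intro j hj
       interval_cases j <;> assumption)

def FoldInv (ts : List String) : Option (Nat × String) → Prop
  | none => ∀ t ∈ ts, catIdx (PySem.Str.lower t) = none
  | some p => p.1 < 9 ∧ p.2 = Lf p.1 ∧ cMatch p.1 ts ∧ ∀ j < p.1, ¬ cMatch j ts

lemma cMatch_cons (i : Nat) (t : String) (ts : List String) :
    cMatch i (t :: ts) ↔ PySem.Str.lower t ∈ Kf i ∨ cMatch i ts := by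
  simp [cMatch]

lemma fold_inv (ts : List String) : FoldInv ts (ts.foldl bStep none) := by
  induction ts with
  | nil => intro t ht; cases ht
  | cons t ts ih =>
    have hstep : (t :: ts).foldl bStep none = mcomb (catIdx (PySem.Str.lower t)) (ts.foldl bStep none) := by
      rw [List.foldl_cons, fold_mcomb, bStep_eq, mcomb_none]
    rw [hstep]
    rcases hc : catIdx (PySem.Str.lower t) with _ | h <;>
      rcases hf : ts.foldl bStep none with _ | p <;> rw [hf] at ih
    · -- no hit on t, no hit on ts
      rw [mcomb_none]
      intro u hu
      rcases List.mem_cons.mp hu with rfl | hu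
      · exact hc
      · exact ih u hu
    · -- no hit on t, hit p on ts
      rw [mcomb_none]
      obtain ⟨h9, hl, hm, hmin⟩ := ih
      exact ⟨h9, hl, (cMatch_cons _ _ _).mpr (Or.inr hm),
        fun j hj hcm => by
          rcases (cMatch_cons _ _ _).mp hcm with hmem | hcm
          · exact catIdx_none _ hc j (by omega) hmem
          · exact hmin j hj hcm⟩
    · -- hit h on t, no hit on ts
      obtain ⟨h9, hl, hmem, hnotbefore⟩ := catIdx_some _ _ hc
      exact ⟨h9, hl, (cMatch_cons _ _ _).mpr (Or.inl hmem),
        fun j hj hcm => by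
          rcases (cMatch_cons _ _ _).mp hcm with hm2 | ⟨u, hu, hm2⟩
          · exact hnotbefore j hj hm2
          · exact catIdx_none _ (ih u hu) j (by omega) hm2⟩
    · -- hits on both: mcomb takes the smaller priority
      obtain ⟨hh9, hhl, hhmem, hhnb⟩ := catIdx_some _ _ hc
      obtain ⟨hp9, hpl, hpm, hpmin⟩ := ih
      rw [show mcomb (some h) (some p) = if p.1 < h.1 then some p else some h from rfl]
      split_ifs with hlt
      · exact ⟨hp9, hpl, (cMatch_cons _ _ _).mpr (Or.inr hpm),
          fun j hj hcm => by
            rcases (cMatch_cons _ _ _).mp hcm with hm2 | hcm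
            · exact hhnb j (by omega) hm2
            · exact hpmin j hj hcm⟩
      · exact ⟨hh9, hhl, (cMatch_cons _ _ _).mpr (Or.inl hhmem),
          fun j hj hcm => by
            rcases (cMatch_cons _ _ _).mp hcm with hm2 | hcm
            · exact hhnb j hj hm2
            · exact hpmin j (by omega) hcm⟩

lemma cond_iff (ts : List String) (K : List String) :
    (PySem.Set.inter (PySem.Set.ofList (ts.map PySem.Str.lower)) (PySem.Set.ofList K) ≠ []) ↔
      ∃ t ∈ ts, PySem.Str.lower t ∈ K := by
  constructor
  · intro hne
    obtain ⟨x, hx⟩ := List.exists_mem_of_ne_nil _ hne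
    obtain ⟨h1, h2⟩ := (PySem.Set.mem_inter _ _ x).mp hx
    obtain ⟨t, ht, rfl⟩ := List.mem_map.mp ((PySem.Set.mem_ofList _ _).mp h1)
    exact ⟨t, ht, (PySem.Set.mem_ofList _ _).mp h2⟩
  · rintro ⟨t, ht, hm⟩
    exact List.ne_nil_of_mem ((PySem.Set.mem_inter _ _ _).mpr
      ⟨(PySem.Set.mem_ofList _ _).mpr (List.mem_map.mpr ⟨t, ht, rfl⟩),
       (PySem.Set.mem_ofList _ _).mpr hm⟩)

-- ===== VERDICT (by name: the statement is the Claim_ definition above) =====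
theorem infer_domain_label_py_spec : Claim_equal_infer_domain_label_py := by
  unfold Claim_equal_infer_domain_label_py
  intro ts _
  unfold Spec_infer_domain_label_py
  have inv := fold_inv ts
  rcases hF : ts.foldl bStep none with _ | p <;> rw [hF] at inv
  · have hc : ∀ i, i < 9 → ¬ cMatch i ts := by
      rintro i hi ⟨t, ht, hm⟩
      exact catIdx_none _ (inv t ht) i hi hm
    have e : infer_domain_label_py_alt ts
        = pyTitle (PySem.Str.join " / " (PySem.List.slice ts none (some 3))) := by
      unfold infer_domain_label_py_alt
      rw [hF]
    rw [e]
    simp only [infer_domain_label_py]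
    rw [if_neg (fun hx => hc 0 (by omega) ((cond_iff ts ["python", "machine", "learning", "data", "model", "ml"]).mp hx)), if_neg (fun hx => hc 1 (by omega) ((cond_iff ts ["react", "frontend", "css", "javascript", "ui", "ux"]).mp hx)), if_neg (fun hx => hc 2 (by omega) ((cond_iff ts ["backend", "api", "server", "database", "sql"]).mp hx)), if_neg (fun hx => hc 3 (by omega) ((cond_iff ts ["devops", "docker", "kubernetes", "aws", "cloud", "infrastructure"]).mp hx)), if_neg (fun hx => hc 4 (by omega) ((cond_iff ts ["java", "spring", "enterprise", "microservices"]).mp hx)), if_neg (fun hx => hc 5 (by omega) ((cond_iff ts ["ios", "android", "mobile", "flutter", "swift"]).mp hx)), if_neg (fun hx => hc 6 (by omega) ((cond_iff ts ["security", "penetration", "vulnerability", "cyber"]).mp hx)), if_neg (fun hx => hc 7 (by omega) ((cond_iff ts ["product", "manager", "agile", "stakeholder"]).mp hx)), if_neg (fun hx => hc 8 (by omega) ((cond_iff ts ["test", "qa", "quality", "automation"]).mp hx))]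
  · obtain ⟨i, lbl⟩ := p
    obtain ⟨h9, hl, hm, hmin⟩ := inv
    simp only at h9 hl hm hmin
    have e : infer_domain_label_py_alt ts = lbl := by
      unfold infer_domain_label_py_alt
      rw [hF]
    rw [e, hl]
    simp only [infer_domain_label_py]
    interval_cases i
    · rw [if_pos ((cond_iff ts ["python", "machine", "learning", "data", "model", "ml"]).mpr hm)]
      rfl
    · rw [if_neg (fun hx => hmin 0 (by omega) ((cond_iff ts ["python", "machine", "learning", "data", "model", "ml"]).mp hx)), if_pos ((cond_iff ts ["react", "frontend", "css", "javascript", "ui", "ux"]).mpr hm)]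
      rfl
    · rw [if_neg (fun hx => hmin 0 (by omega) ((cond_iff ts ["python", "machine", "learning", "data", "model", "ml"]).mp hx)), if_neg (fun hx => hmin 1 (by omega) ((cond_iff ts ["react", "frontend", "css", "javascript", "ui", "ux"]).mp hx)), if_pos ((cond_iff ts ["backend", "api", "server", "database", "sql"]).mpr hm)]
      rfl
    · rw [if_neg (fun hx => hmin 0 (by omega) ((cond_iff ts ["python", "machine", "learning", "data", "model", "ml"]).mp hx)), if_neg (fun hx => hmin 1 (by omega) ((cond_iff ts ["react", "frontend", "css", "javascript", "ui", "ux"]).mp hx)), if_neg (fun hx => hmin 2 (by omega) ((cond_iff ts ["backend", "api", "server", "database", "sql"]).mp hx)), if_pos ((cond_iff ts ["devops", "docker", "kubernetes", "aws", "cloud", "infrastructure"]).mpr hm)]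
      rfl
    · rw [if_neg (fun hx => hmin 0 (by omega) ((cond_iff ts ["python", "machine", "learning", "data", "model", "ml"]).mp hx)), if_neg (fun hx => hmin 1 (by omega) ((cond_iff ts ["react", "frontend", "css", "javascript", "ui", "ux"]).mp hx)), if_neg (fun hx => hmin 2 (by omega) ((cond_iff ts ["backend", "api", "server", "database", "sql"]).mp hx)), if_neg (fun hx => hmin 3 (by omega) ((cond_iff ts ["devops", "docker", "kubernetes", "aws", "cloud", "infrastructure"]).mp hx)), if_pos ((cond_iff ts ["java", "spring", "enterprise", "microservices"]).mpr hm)]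
      rfl
    · rw [if_neg (fun hx => hmin 0 (by omega) ((cond_iff ts ["python", "machine", "learning", "data", "model", "ml"]).mp hx)), if_neg (fun hx => hmin 1 (by omega) ((cond_iff ts ["react", "frontend", "css", "javascript", "ui", "ux"]).mp hx)), if_neg (fun hx => hmin 2 (by omega) ((cond_iff ts ["backend", "api", "server", "database", "sql"]).mp hx)), if_neg (fun hx => hmin 3 (by omega) ((cond_iff ts ["devops", "docker", "kubernetes", "aws", "cloud", "infrastructure"]).mp hx)), if_neg (fun hx => hmin 4 (by omega) ((cond_iff ts ["java", "spring", "enterprise", "microservices"]).mp hx)), if_pos ((cond_iff ts ["ios", "android", "mobile", "flutter", "swift"]).mpr hm)]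
      rfl
    · rw [if_neg (fun hx => hmin 0 (by omega) ((cond_iff ts ["python", "machine", "learning", "data", "model", "ml"]).mp hx)), if_neg (fun hx => hmin 1 (by omega) ((cond_iff ts ["react", "frontend", "css", "javascript", "ui", "ux"]).mp hx)), if_neg (fun hx => hmin 2 (by omega) ((cond_iff ts ["backend", "api", "server", "database", "sql"]).mp hx)), if_neg (fun hx => hmin 3 (by omega) ((cond_iff ts ["devops", "docker", "kubernetes", "aws", "cloud", "infrastructure"]).mp hx)), if_neg (fun hx => hmin 4 (by omega) ((cond_iff ts ["java", "spring", "enterprise", "microservices"]).mp hx)), if_neg (fun hx => hmin 5 (by omega) ((cond_iff ts ["ios", "android", "mobile", "flutter", "swift"]).mp hx)), if_pos ((cond_iff ts ["security", "penetration", "vulnerability", "cyber"]).mpr hm)]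
      rfl
    · rw [if_neg (fun hx => hmin 0 (by omega) ((cond_iff ts ["python", "machine", "learning", "data", "model", "ml"]).mp hx)), if_neg (fun hx => hmin 1 (by omega) ((cond_iff ts ["react", "frontend", "css", "javascript", "ui", "ux"]).mp hx)), if_neg (fun hx => hmin 2 (by omega) ((cond_iff ts ["backend", "api", "server", "database", "sql"]).mp hx)), if_neg (fun hx => hmin 3 (by omega) ((cond_iff ts ["devops", "docker", "kubernetes", "aws", "cloud", "infrastructure"]).mp hx)), if_neg (fun hx => hmin 4 (by omega) ((cond_iff ts ["java", "spring", "enterprise", "microservices"]).mp hx)), if_neg (fun hx => hmin 5 (by omega) ((cond_iff ts ["ios", "android", "mobile", "flutter", "swift"]).mp hx)), if_neg (fun hx => hmin 6 (by omega) ((cond_iff ts ["security", "penetration", "vulnerability", "cyber"]).mp hx)), if_pos ((cond_iff ts ["product", "manager", "agile", "stakeholder"]).mpr hm)]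
      rfl
    · rw [if_neg (fun hx => hmin 0 (by omega) ((cond_iff ts ["python", "machine", "learning", "data", "model", "ml"]).mp hx)), if_neg (fun hx => hmin 1 (by omega) ((cond_iff ts ["react", "frontend", "css", "javascript", "ui", "ux"]).mp hx)), if_neg (fun hx => hmin 2 (by omega) ((cond_iff ts ["backend", "api", "server", "database", "sql"]).mp hx)), if_neg (fun hx => hmin 3 (by omega) ((cond_iff ts ["devops", "docker", "kubernetes", "aws", "cloud", "infrastructure"]).mp hx)), if_neg (fun hx => hmin 4 (by omega) ((cond_iff ts ["java", "spring", "enterprise", "microservices"]).mp hx)), if_neg (fun hx => hmin 5 (by omega) ((cond_iff ts ["ios", "android", "mobile", "flutter", "swift"]).mp hx)), if_neg (fun hx => hmin 6 (by omega) ((cond_iff ts ["security", "penetration", "vulnerability", "cyber"]).mp hx)), if_neg (fun hx => hmin 7 (by omega) ((cond_iff ts ["product", "manager", "agile", "stakeholder"]).mp hx)), if_pos ((cond_iff ts ["test", "qa", "quality", "automation"]).mpr hm)]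
      rfl
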